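-- pv_equiv track=rewrite | github.com/alessandrofariassantos-web/Nasapay | utils/cadastros/empresa.py | _index_after_n_digits
-- ===== SOURCE A (Python) =====
-- def _index_after_n_digits(text: str, n: int) -> int:
--     count = 0
--     for i,ch in enumerate(text):
--         if ch.isdigit():
--             count += 1
--             if count == n:
--                 return i+1
--     return len(text)
-- ===== SOURCE B (Python) =====
-- def _index_after_n_digits(text: str, n: int) -> int:
--     # prefix digit counts + binary search for the first prefix containing n digits
--     counts = [0]
--     for ch in text:
--         counts.append(counts[-1] + (1 if ch.isdigit() else 0))
--     if n < 1 or counts[-1] < n: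
--         return len(text)
--     lo, hi = 0, len(text)
--     while lo < hi:
--         mid = (lo + hi) // 2
--         if counts[mid] < n:
--             lo = mid + 1
--         else:
--             hi = mid
--     return lo
-- ===== Notes on version B (the rewrite author's own statement) =====
-- stated objective: alternative
-- what changed: Replaces the counting scan with early return by a prefix-digit-count table built once plus a binary search (bisect_left by hand) for the first prefix containing n digits.
import Mathlib
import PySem

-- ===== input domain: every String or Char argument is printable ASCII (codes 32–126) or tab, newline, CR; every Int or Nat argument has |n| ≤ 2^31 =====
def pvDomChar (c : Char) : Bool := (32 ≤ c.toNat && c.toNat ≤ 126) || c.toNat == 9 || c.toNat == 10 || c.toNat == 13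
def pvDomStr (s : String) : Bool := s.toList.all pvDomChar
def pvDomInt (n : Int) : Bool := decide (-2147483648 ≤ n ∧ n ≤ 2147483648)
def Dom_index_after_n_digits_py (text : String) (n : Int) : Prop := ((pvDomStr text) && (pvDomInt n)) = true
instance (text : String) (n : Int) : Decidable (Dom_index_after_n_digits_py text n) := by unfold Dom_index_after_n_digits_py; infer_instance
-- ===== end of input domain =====

-- B answers with a prefix-digit-count table plus a binary search instead of A's counting scan
-- with early return (alternative algorithm, same asymptotic cost).

-- ===== PORT A =====
-- the 'for i,ch in enumerate(text)' loop with its running count; 'some' = the early 'return i+1'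
def idxLoopA (n : Int) : List Char → Int → Int → Option Int
  | [], _, _ => none
  | c :: cs, i, count =>
    if PySem.Chars.isdigit c then
      if count + 1 = n then some (i + 1) else idxLoopA n cs (i + 1) (count + 1)
    else idxLoopA n cs (i + 1) count

def index_after_n_digits_py (text : String) (n : Int) : Int :=
  (idxLoopA n text.toList 0 0).getD (PySem.Str.len text)

-- ===== PORT B =====
-- the 'counts.append(counts[-1] + …)' loop building the prefix digit counts
def bCounts (cs : List Char) : List Int :=
  cs.foldl (fun acc ch =>
    acc ++ [PySem.List.pyGetD acc (-1) 0 + (if PySem.Chars.isdigit ch then 1 else 0)]) [0]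

-- the 'while lo < hi' binary-search loop (fuel = hi - lo, enough since the gap shrinks each turn)
def bSearchGo : Nat → List Int → Int → Int → Int → Int
  | 0, _, _, lo, _ => lo
  | fuel + 1, counts, n, lo, hi =>
    if lo < hi then
      let mid := PySem.Int.floordiv (lo + hi) 2
      if PySem.List.pyGetD counts mid 0 < n then bSearchGo fuel counts n (mid + 1) hi
      else bSearchGo fuel counts n lo mid
    else lo

def bSearch (counts : List Int) (n : Int) (lo hi : Int) : Int :=
  bSearchGo (hi - lo).toNat counts n lo hi

def index_after_n_digits_py_alt (text : String) (n : Int) : Int :=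
  let counts := bCounts text.toList
  if n < 1 ∨ PySem.List.pyGetD counts (-1) 0 < n then PySem.Str.len text
  else bSearch counts n 0 (PySem.Str.len text)

-- ===== PRECONDITION & SPEC =====
def Spec_index_after_n_digits_py (text : String) (n : Int) (out : Int) : Prop := out = index_after_n_digits_py_alt text n
instance (text : String) (n : Int) (out : Int) : Decidable (Spec_index_after_n_digits_py text n out) := by unfold Spec_index_after_n_digits_py; infer_instance

-- ===== CLAIM (what is proved, stated in full; the proofs are below) =====
def Claim_equal_index_after_n_digits_py : Prop := ∀ (text : String) (n : Int), Dom_index_after_n_digits_py text n → Spec_index_after_n_digits_py text n (index_after_n_digits_py text n)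

-- ===== LEMMAS AND PROOFS =====

-- digit positions of cs (0-based), the common yardstick of both proofs
def digPos (cs : List Char) : List Int :=
  ((PySem.List.enumerate cs 0).filter (fun p => PySem.Chars.isdigit p.2)).map (·.1)

-- A's loop, started at index i with running count, looks up the (n-count)-th digit position.
lemma idxLoopA_eq (n : Int) (cs : List Char) (i count : Int) :
    idxLoopA n cs i count =
      (if 1 ≤ n - count ∧ n - count ≤ (((PySem.List.enumerate cs i).filter (fun p => PySem.Chars.isdigit p.2)).map (·.1)).length
       then some (PySem.List.pyGetD (((PySem.List.enumerate cs i).filter (fun p => PySem.Chars.isdigit p.2)).map (·.1)) (n - count - 1) 0 + 1)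
       else none) := by
  induction cs generalizing i count with
  | nil => simp [idxLoopA, PySem.List.enumerate_nil]; omega
  | cons c cs ih =>
    rw [PySem.List.enumerate_cons]
    by_cases hd : PySem.Chars.isdigit c
    · by_cases hn : count + 1 = n
      · have h0 : n - count - 1 = 0 := by omega
        simp [idxLoopA, hd, hn, h0, PySem.List.pyGetD, PySem.List.pyGet?, PySem.List.pyIdx?]
        omega
      · simp only [idxLoopA, hd, if_neg hn, ih, List.filter_cons, if_true]
        have hlen : ∀ (p : Int × Char) (l : List (Int × Char)), ((p :: l).map (fun x : Int × Char => x.1)).length = (l.map (fun x : Int × Char => x.1)).length + 1 := by intro p l; simp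
        by_cases hc : 1 ≤ n - (count + 1) ∧ n - (count + 1) ≤ (((PySem.List.enumerate cs (i+1)).filter (fun p => PySem.Chars.isdigit p.2)).map (·.1)).length
        · rw [if_pos hc, if_pos (by rw [hlen]; push_cast; omega)]
          congr 1
          rw [PySem.List.pyGetD_of_nonneg _ _ (by omega), PySem.List.pyGetD_of_nonneg _ _ (by omega)]
          have h3 : (n - count - 1).toNat = ((n - (count+1) - 1).toNat) + 1 := by omega
          rw [h3]
          simp [List.getD]
        · rw [if_neg hc, if_neg (by rw [hlen]; push_cast at *; omega)]
    · simp only [idxLoopA, hd, List.filter_cons, if_neg, Bool.false_eq_true, not_false_iff, ih]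

lemma enumerate_append_singleton (cs : List Char) (c : Char) (s : Int) :
    PySem.List.enumerate (cs ++ [c]) s = PySem.List.enumerate cs s ++ [((s + cs.length : Int), c)] := by
  induction cs generalizing s with
  | nil => simp [PySem.List.enumerate_cons, PySem.List.enumerate_nil]
  | cons x xs ih =>
    simp only [List.cons_append, PySem.List.enumerate_cons, ih]
    simp
    ring_nf

lemma digPos_append (cs : List Char) (c : Char) :
    digPos (cs ++ [c]) =
      digPos cs ++ (if PySem.Chars.isdigit c then [(cs.length : Int)] else []) := by
  unfold digPos
  rw [enumerate_append_singleton, List.filter_append, List.map_append]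
  by_cases hd : PySem.Chars.isdigit c <;> simp [hd]

-- (digPos cs).length counts the digits of cs
lemma digPos_count_eq (cs : List Char) :
    (digPos cs).length = cs.countP (fun ch => PySem.Chars.isdigit ch) := by
  induction cs using List.reverseRecOn with
  | nil => simp [digPos, PySem.List.enumerate_nil]
  | append_singleton cs c ih =>
    rw [digPos_append, List.countP_append, List.length_append, ih]
    by_cases hd : PySem.Chars.isdigit c <;> simp [hd]

-- every entry of digPos is an in-range digit index, with exactly k digits strictly before it
lemma digPos_spec (cs : List Char) (k : Nat) (hk : k < (digPos cs).length) :
    ∃ j : Nat, (digPos cs)[k]! = (j : Int) ∧ j < cs.length ∧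
      (cs.take j).countP (fun ch => PySem.Chars.isdigit ch) = k ∧
      (cs.take (j+1)).countP (fun ch => PySem.Chars.isdigit ch) = k + 1 := by
  induction cs using List.reverseRecOn with
  | nil => simp [digPos, PySem.List.enumerate_nil] at hk
  | append_singleton cs c ih =>
    rw [digPos_append] at hk ⊢
    by_cases hd : PySem.Chars.isdigit c
    · rw [if_pos hd] at hk ⊢
      rcases Nat.lt_or_ge k (digPos cs).length with hlt | hge
      · obtain ⟨j, hj1, hj2, hj3, hj4⟩ := ih hlt
        refine ⟨j, ?_, by simp; omega, ?_, ?_⟩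
        · rw [getElem!_pos (digPos cs ++ [((cs.length : Nat) : Int)]) k (by simp; omega),
              List.getElem_append_left hlt]
          rw [getElem!_pos (digPos cs) k hlt] at hj1
          exact hj1
        · rw [List.take_append_of_le_length (by omega)]; exact hj3
        · rw [List.take_append_of_le_length (by omega)]; exact hj4
      · have hke : k = (digPos cs).length := by simp at hk; omega
        subst hke
        refine ⟨cs.length, ?_, by simp, ?_, ?_⟩
        · rw [getElem!_pos (digPos cs ++ [((cs.length : Nat) : Int)]) (digPos cs).length (by simp)]
          simp
        · rw [List.take_append_of_le_length (by omega), List.take_of_length_le (by omega)]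
          exact (digPos_count_eq cs).symm
        · rw [List.take_of_length_le (by simp), List.countP_append, ← digPos_count_eq cs]
          simp [hd]
    · rw [if_neg hd] at hk ⊢
      simp only [List.append_nil] at hk ⊢
      obtain ⟨j, hj1, hj2, hj3, hj4⟩ := ih hk
      exact ⟨j, hj1, by simp; omega,
        by rw [List.take_append_of_le_length (by omega)]; exact hj3,
        by rw [List.take_append_of_le_length (by omega)]; exact hj4⟩

-- the counts table is the list of prefix digit counts
lemma bCounts_eq (cs : List Char) :
    bCounts cs = (List.range (cs.length + 1)).map
      (fun i => ((cs.take i).countP (fun ch => PySem.Chars.isdigit ch) : Int)) := by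
  induction cs using List.reverseRecOn with
  | nil => simp [bCounts, List.range_succ]
  | append_singleton cs c ih =>
    have hstep : bCounts (cs ++ [c]) = bCounts cs ++
        [PySem.List.pyGetD (bCounts cs) (-1) 0 + (if PySem.Chars.isdigit c then 1 else 0)] := by
      unfold bCounts; rw [List.foldl_append]; rfl
    have hL : PySem.List.pyGetD (bCounts cs) (-1) 0
        = (cs.countP (fun ch => PySem.Chars.isdigit ch) : Int) := by
      rw [ih, List.range_succ, List.map_append, List.map_singleton,
          PySem.List.pyGetD_neg_one_append_singleton]
      simp
    rw [hstep, hL, ih]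
    rw [show (cs ++ [c]).length + 1 = cs.length + 1 + 1 by simp]
    rw [List.range_succ (n := cs.length + 1), List.map_append]
    congr 1
    · apply List.map_congr_left
      intro i hi
      rw [List.mem_range] at hi
      rw [List.take_append_of_le_length (by omega)]
    · rw [List.map_singleton, List.take_of_length_le (by simp), List.countP_append]
      by_cases hd : PySem.Chars.isdigit c <;> simp [hd]

-- reading the counts table at 0 ≤ i ≤ len
lemma counts_get (cs : List Char) (i : Int) (h0 : 0 ≤ i) (h1 : i ≤ (cs.length : Int)) :
    PySem.List.pyGetD (bCounts cs) i 0
      = ((cs.take i.toNat).countP (fun ch => PySem.Chars.isdigit ch) : Int) := by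
  rw [bCounts_eq]
  rw [PySem.List.pyGetD_eq_getElem _ _ h0 (by simp; omega)]
  simp

-- prefix digit counts are monotone in the prefix length
lemma countP_take_mono (cs : List Char) (a b : Nat) (h : a ≤ b) :
    (cs.take a).countP (fun ch => PySem.Chars.isdigit ch)
      ≤ (cs.take b).countP (fun ch => PySem.Chars.isdigit ch) := by
  rw [show cs.take a = (cs.take b).take a by rw [List.take_take, Nat.min_eq_left h]]
  exact (List.take_sublist _ _).countP_le

-- bSearch returns the stated boundary t when counts is < n strictly below t and ≥ n from t on
lemma bSearchGo_eq (fuel : Nat) (counts : List Int) (n t : Int) (lo hi : Int)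
    (hf : (hi - lo).toNat ≤ fuel) (h1 : lo ≤ t) (h2 : t ≤ hi)
    (hlow : ∀ i : Int, lo ≤ i → i < t → PySem.List.pyGetD counts i 0 < n)
    (hhigh : ∀ i : Int, t ≤ i → i < hi → n ≤ PySem.List.pyGetD counts i 0) :
    bSearchGo fuel counts n lo hi = t := by
  induction fuel generalizing lo hi with
  | zero => simp only [bSearchGo]; omega
  | succ fuel ih =>
    rw [bSearchGo]
    by_cases h : lo < hi
    · rw [if_pos h]
      have hb := PySem.Int.floordiv_two_mid_bounds (lo := lo) (hi := hi) (by omega)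
      have hmlt : PySem.Int.floordiv (lo + hi) 2 < hi :=
        (PySem.Int.floordiv_lt_iff_lt_mul (by omega)).2 (by omega)
      set mid := PySem.Int.floordiv (lo + hi) 2 with hmid
      by_cases hcmp : PySem.List.pyGetD counts mid 0 < n
      · rw [if_pos hcmp]
        have hmt : mid < t := by
          by_contra hcon
          exact absurd (hhigh mid (by omega) hmlt) (by omega)
        exact ih (mid + 1) hi (by omega) (by omega) h2
          (fun i hi1 hi2 => hlow i (by omega) hi2) hhigh
      · rw [if_neg hcmp]
        have htm : t ≤ mid := by
          by_contra hcon
          exact absurd (hlow mid (by omega) (by omega)) hcmp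
        exact ih lo mid (by omega) h1 htm hlow
          (fun i hi1 hi2 => hhigh i hi1 (by omega))
    · rw [if_neg h]; omega

lemma bSearch_eq (counts : List Int) (n t : Int) (lo hi : Int)
    (h1 : lo ≤ t) (h2 : t ≤ hi)
    (hlow : ∀ i : Int, lo ≤ i → i < t → PySem.List.pyGetD counts i 0 < n)
    (hhigh : ∀ i : Int, t ≤ i → i < hi → n ≤ PySem.List.pyGetD counts i 0) :
    bSearch counts n lo hi = t :=
  bSearchGo_eq _ counts n t lo hi le_rfl h1 h2 hlow hhigh

-- ===== VERDICT (by name: the statement is the Claim_ definition above) =====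
theorem index_after_n_digits_py_spec : Claim_equal_index_after_n_digits_py := by
  intro text n _
  unfold Spec_index_after_n_digits_py index_after_n_digits_py index_after_n_digits_py_alt
  rw [idxLoopA_eq]
  simp only [sub_zero]
  set cs := text.toList with hcs
  have hpos : ((PySem.List.enumerate cs 0).filter (fun p => PySem.Chars.isdigit p.2)).map (·.1) = digPos cs := rfl
  rw [hpos]
  have hlen : PySem.Str.len text = (cs.length : Int) := by simp [PySem.Str.len_eq, hcs]
  have hlast : PySem.List.pyGetD (bCounts cs) (-1) 0 = ((digPos cs).length : Int) := by
    rw [bCounts_eq, List.range_succ, List.map_append, List.map_singleton,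
        PySem.List.pyGetD_neg_one_append_singleton, digPos_count_eq]
    simp
  by_cases hc : 1 ≤ n ∧ n ≤ ((digPos cs).length : Int)
  · rw [if_pos hc, if_neg (by rw [hlast]; omega)]
    have hkn : (n - 1).toNat < (digPos cs).length := by omega
    obtain ⟨j, hj1, hj2, hj3, hj4⟩ := digPos_spec cs (n - 1).toNat hkn
    have hget : PySem.List.pyGetD (digPos cs) (n - 1) 0 = (j : Int) := by
      rw [PySem.List.pyGetD_eq_getElem _ _ (by omega) (by simp; omega)]
      rw [getElem!_pos (digPos cs) (n - 1).toNat hkn] at hj1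
      exact hj1
    have hB : bSearch (bCounts cs) n 0 (PySem.Str.len text) = (j : Int) + 1 := by
      rw [hlen]
      refine bSearch_eq (bCounts cs) n ((j : Int) + 1) 0 (cs.length : Int)
        (by omega) (by omega) ?_ ?_
      · intro i hi0 hit
        rw [counts_get cs i hi0 (by omega)]
        have hm := countP_take_mono cs i.toNat j (by omega)
        rw [hj3] at hm
        have hm' : ((cs.take i.toNat).countP (fun ch => PySem.Chars.isdigit ch) : Int)
            ≤ (((n - 1).toNat : Nat) : Int) := by exact_mod_cast hm
        omega
      · intro i hit hihi
        rw [counts_get cs i (by omega) (by omega)]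
        have hm := countP_take_mono cs (j + 1) i.toNat (by omega)
        rw [hj4] at hm
        have hm' : (((n - 1).toNat + 1 : Nat) : Int)
            ≤ ((cs.take i.toNat).countP (fun ch => PySem.Chars.isdigit ch) : Int) := by exact_mod_cast hm
        omega
    rw [hB]
    simp [hget]
  · rw [if_neg hc, if_pos (by rw [hlast]; omega)]
    simp
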